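-- pv_equiv track=rewrite | github.com/marcosremar/parle_backend | src/services/api_gateway/routers/session.py | determine_transport
-- ===== SOURCE A (Python) =====
-- from typing import Dict, Any, Optional, List
-- from enum import Enum
--
-- class TransportType(str, Enum):
--     """Available transport types"""
--     WEBRTC = "webrtc"
--     SOCKETIO = "socketio"
--     REST = "rest"
--
-- def determine_transport(
--     supported_transports: List[TransportType],
--     server_health: Dict[str, Any]
-- ) -> TransportType:
--     """
--     Determine best transport based on:
--     - Client preferences
--     - Server availability
--     - Current load
--     """
--     # For now, simple logic: use first supported transport
--     # TODO: Add load balancing, health checks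
--
--     # Check server health for each transport
--     transport_priority = {
--         TransportType.WEBRTC: 1,
--         TransportType.SOCKETIO: 2,
--         TransportType.REST: 3
--     }
--
--     # Sort by priority and client support
--     available = [t for t in supported_transports if transport_priority.get(t)]
--     available.sort(key=lambda t: transport_priority[t])
--
--     if not available:
--         return TransportType.REST  # Fallback
--
--     return available[0]
-- ===== SOURCE B (Python) =====
-- def determine_transport(supported_transports, server_health):
--     # Single pass: keep the supported transport with the smallest priority seen so far.
--     priority = {"webrtc": 1, "socketio": 2, "rest": 3}
--     best = None
--     best_p = None
--     for t in supported_transports: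
--         p = priority.get(t)
--         if p and (best_p is None or p < best_p):
--             best, best_p = t, p
--     if best is None:
--         return "rest"
--     return best
-- ===== Notes on version B (the rewrite author's own statement) =====
-- stated objective: simpler
-- what changed: Replaces filter-then-stable-sort-then-take-head with a single-pass min-tracking scan that keeps the supported transport of smallest priority.
import Mathlib
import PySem

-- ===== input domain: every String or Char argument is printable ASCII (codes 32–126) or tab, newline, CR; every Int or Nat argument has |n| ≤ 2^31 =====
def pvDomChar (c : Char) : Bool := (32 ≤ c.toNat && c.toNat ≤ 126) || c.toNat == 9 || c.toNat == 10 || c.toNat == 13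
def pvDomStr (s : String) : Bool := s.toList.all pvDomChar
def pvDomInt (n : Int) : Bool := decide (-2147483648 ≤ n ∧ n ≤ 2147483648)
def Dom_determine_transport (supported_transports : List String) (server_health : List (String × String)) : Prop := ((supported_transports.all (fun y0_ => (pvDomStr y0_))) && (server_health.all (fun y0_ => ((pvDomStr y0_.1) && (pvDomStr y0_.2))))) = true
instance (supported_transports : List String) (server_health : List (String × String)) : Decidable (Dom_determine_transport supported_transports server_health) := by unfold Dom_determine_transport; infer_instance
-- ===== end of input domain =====

-- ===== PORT A =====
-- B computes the same value by a single-pass scan instead of filter + stable sort; same result.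
-- the transport_priority dict literal shared by both versions
def pvPriority : PySem.Dict String Int :=
  PySem.Dict.ofList [("webrtc", 1), ("socketio", 2), ("rest", 3)]

-- literal port of A: filter on truthy priority.get(t), stable sort by priority, head or "rest"
-- (the sort key transport_priority[t] never raises: every kept t is a dict key, so getD's default is unused)
def determine_transport (supported_transports : List String) (server_health : List (String × String)) : String :=
  let available := supported_transports.filter (fun t =>
    match pvPriority.get? t with
    | none => false
    | some v => v != 0)
  let sortedAvail := PySem.List.sorted available (fun t => pvPriority.getD t 0) false
  match sortedAvail with
  | [] => "rest"
  | m :: _ => m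

-- ===== PORT B =====
-- literal port of B: one fold keeping (best, best_p), the minimum-priority supported transport seen so far
def pvStep (acc : Option String × Option Int) (t : String) : Option String × Option Int :=
  match pvPriority.get? t with
  | none => acc
  | some p =>
    if p != 0 && (match acc.2 with | none => true | some bp => decide (p < bp)) then (some t, some p)
    else acc

def determine_transport_alt (supported_transports : List String) (server_health : List (String × String)) : String :=
  let r := supported_transports.foldl pvStep (none, none)
  match r.1 with
  | none => "rest"
  | some b => b

-- ===== PRECONDITION & SPEC =====
def Spec_determine_transport (supported_transports : List String) (server_health : List (String × String)) (out : String) : Prop := out = determine_transport_alt supported_transports server_health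
instance (supported_transports : List String) (server_health : List (String × String)) (out : String) : Decidable (Spec_determine_transport supported_transports server_health out) := by unfold Spec_determine_transport; infer_instance

-- ===== CLAIM (what is proved, stated in full; the proofs are below) =====
def Claim_equal_determine_transport : Prop := ∀ (supported_transports : List String) (server_health : List (String × String)), Dom_determine_transport supported_transports server_health → Spec_determine_transport supported_transports server_health (determine_transport supported_transports server_health)

-- ===== LEMMAS AND PROOFS =====

-- the common characterisation: the answer depends only on which of the three names occur
def pvChr (st : List String) : String :=
  if "webrtc" ∈ st then "webrtc"
  else if "socketio" ∈ st then "socketio"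
  else if "rest" ∈ st then "rest"
  else "rest"

theorem pvPriority_mk : pvPriority = PySem.Dict.mk [("webrtc", 1), ("socketio", 2), ("rest", 3)] := by
  decide

theorem get?_pvPriority_none (x : String) (h1 : x ≠ "webrtc") (h2 : x ≠ "socketio") (h3 : x ≠ "rest") :
    pvPriority.get? x = none := by
  rw [pvPriority_mk]
  simp [PySem.Dict.get?, Ne.symm h1, Ne.symm h2, Ne.symm h3]

-- ---- A side ----

theorem pvFA_iff (t : String) :
    ((match pvPriority.get? t with | none => false | some v => v != 0) = true) ↔
      (t = "webrtc" ∨ t = "socketio" ∨ t = "rest") := by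
  by_cases h1 : t = "webrtc"
  · subst h1; decide
  · by_cases h2 : t = "socketio"
    · subst h2; decide
    · by_cases h3 : t = "rest"
      · subst h3; decide
      · rw [get?_pvPriority_none t h1 h2 h3]
        simp [h1, h2, h3]

theorem determine_transport_eq_chr (st : List String) (sh : List (String × String)) :
    determine_transport st sh = pvChr st := by
  unfold determine_transport pvChr
  set fA : String → Bool := fun t => (match pvPriority.get? t with | none => false | some v => v != 0) with hfA
  set key : String → Int := fun t => pvPriority.getD t 0 with hkey
  set avail := st.filter fA with havail
  have hmemA : ∀ x, x ∈ avail ↔ x ∈ st ∧ (x = "webrtc" ∨ x = "socketio" ∨ x = "rest") := by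
    intro x
    rw [havail, List.mem_filter, hfA, pvFA_iff]
  cases h : PySem.List.sorted avail key false with
  | nil =>
    simp only [h]
    have he : avail = [] := (PySem.List.sorted_eq_nil_iff avail key false).mp h
    have hw : "webrtc" ∉ st := fun hx => by
      have : ("webrtc" : String) ∈ avail := (hmemA _).mpr ⟨hx, Or.inl rfl⟩
      simp [he] at this
    have hs : "socketio" ∉ st := fun hx => by
      have : ("socketio" : String) ∈ avail := (hmemA _).mpr ⟨hx, Or.inr (Or.inl rfl)⟩
      simp [he] at this
    have hr : "rest" ∉ st := fun hx => by
      have : ("rest" : String) ∈ avail := (hmemA _).mpr ⟨hx, Or.inr (Or.inr rfl)⟩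
      simp [he] at this
    simp [hw, hs, hr]
  | cons m t =>
    simp only [h]
    have hm : m ∈ avail := (PySem.List.mem_sorted avail key false m).mp (h ▸ List.mem_cons_self ..)
    have hmin : ∀ y ∈ avail, key m ≤ key y := PySem.List.key_head_sorted_le avail key h
    obtain ⟨hmst, hm3⟩ := (hmemA m).mp hm
    by_cases hw : "webrtc" ∈ st
    · have hk : key m ≤ key "webrtc" := hmin _ ((hmemA _).mpr ⟨hw, Or.inl rfl⟩)
      have hm' : m = "webrtc" := by
        rcases hm3 with h3 | h3 | h3 <;> subst h3
        · rfl
        · revert hk; decide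
        · revert hk; decide
      simp [hw, hm']
    · by_cases hs : "socketio" ∈ st
      · have hk : key m ≤ key "socketio" := hmin _ ((hmemA _).mpr ⟨hs, Or.inr (Or.inl rfl)⟩)
        have hm' : m = "socketio" := by
          rcases hm3 with h3 | h3 | h3 <;> subst h3
          · exact absurd hmst hw
          · rfl
          · revert hk; decide
        simp [hw, hs, hm']
      · by_cases hr : "rest" ∈ st
        · have hm' : m = "rest" := by
            rcases hm3 with h3 | h3 | h3 <;> subst h3
            · exact absurd hmst hw
            · exact absurd hmst hs
            · rfl
          simp [hw, hs, hr, hm']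
        · rcases hm3 with h3 | h3 | h3 <;> subst h3
          · exact absurd hmst hw
          · exact absurd hmst hs
          · exact absurd hmst hr

-- ---- B side ----

theorem pvLoopB (st : List String) : ∀ s : Option String × Option Int,
    (s = (none, none) ∨ s = (some "webrtc", some 1) ∨ s = (some "socketio", some 2) ∨ s = (some "rest", some 3)) →
    st.foldl pvStep s =
      (if "webrtc" ∈ st then (some "webrtc", some 1)
       else if s = (some "webrtc", some 1) then s
       else if "socketio" ∈ st then (some "socketio", some 2)
       else if s = (some "socketio", some 2) then s
       else if "rest" ∈ st then (some "rest", some 3)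
       else s) := by
  induction st with
  | nil =>
    intro s hs
    rcases hs with h | h | h | h <;> subst h <;> decide
  | cons x xs ih =>
    intro s hs
    have hstep : ∀ s', pvStep s x = s' →
        (s' = (none, none) ∨ s' = (some "webrtc", some 1) ∨ s' = (some "socketio", some 2) ∨ s' = (some "rest", some 3)) := by
      intro s' hs'
      by_cases h1 : x = "webrtc"
      · subst h1; rcases hs with h | h | h | h <;> subst h <;> subst hs' <;> decide
      · by_cases h2 : x = "socketio"
        · subst h2; rcases hs with h | h | h | h <;> subst h <;> subst hs' <;> decide
        · by_cases h3 : x = "rest"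
          · subst h3; rcases hs with h | h | h | h <;> subst h <;> subst hs' <;> decide
          · have : pvStep s x = s := by unfold pvStep; rw [get?_pvPriority_none x h1 h2 h3]
            rw [this] at hs'; subst hs'; exact hs
    rw [List.foldl_cons, ih _ (hstep _ rfl)]
    by_cases h1 : x = "webrtc"
    · subst h1
      have hx : pvStep s ("webrtc") = (some "webrtc", some 1) := by
        rcases hs with h | h | h | h <;> subst h <;> decide
      rw [hx]
      simp
    · by_cases h2 : x = "socketio"
      · subst h2
        rcases hs with h | h | h | h <;> subst h <;>
          simp [pvStep, pvPriority_mk, PySem.Dict.get?_mk_cons, List.mem_cons, h1]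
      · by_cases h3 : x = "rest"
        · subst h3
          rcases hs with h | h | h | h <;> subst h <;>
            simp [pvStep, pvPriority_mk, PySem.Dict.get?_mk_cons, List.mem_cons, h1, h2]
        · have hx : pvStep s x = s := by unfold pvStep; rw [get?_pvPriority_none x h1 h2 h3]
          rw [hx]
          simp [List.mem_cons, Ne.symm h1, Ne.symm h2, Ne.symm h3]

theorem determine_transport_alt_eq_chr (st : List String) (sh : List (String × String)) :
    determine_transport_alt st sh = pvChr st := by
  unfold determine_transport_alt pvChr
  rw [pvLoopB st (none, none) (Or.inl rfl)]
  split_ifs <;> simp_all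

-- ===== VERDICT (by name: the statement is the Claim_ definition above) =====
theorem determine_transport_spec : Claim_equal_determine_transport := by
  intro st sh _
  unfold Spec_determine_transport
  rw [determine_transport_eq_chr, determine_transport_alt_eq_chr]
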